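-- pv_equiv track=rewrite | github.com/SujoyDU/LeetCodeProblems | reverseInt.py | modnumber
-- ===== SOURCE A (Python) =====
-- def modnumber(x:int):
--     flag = 0
--     if x < 0:
--         flag = 1
--         x = -(x)
--     count =0
--     out = 0
--     while(x > 0):
--         out = out * 10 + (x % 10)
--         # count += 1
--         x = x // 10
--     if abs(out) > pow(2, 31) - 1: return 0
--     elif (flag == 0): return out
--     else: return -out
-- ===== SOURCE B (Python) =====
-- def modnumber(x: int):
--     sign = -1 if x < 0 else 1
--     out = sum((ord(c) - 48) * 10 ** i for i, c in enumerate(str(abs(x))))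
--     if out > 2 ** 31 - 1:
--         return 0
--     return sign * out
-- ===== Notes on version B (the rewrite author's own statement) =====
-- stated objective: alternative
-- what changed: Replaces the mutating divide-by-ten accumulator loop with a closed positional-weight sum: each digit of str(abs(x)) taken via enumerate is weighted by ten to its index, then the same overflow clamp and sign are applied.
import Mathlib
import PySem

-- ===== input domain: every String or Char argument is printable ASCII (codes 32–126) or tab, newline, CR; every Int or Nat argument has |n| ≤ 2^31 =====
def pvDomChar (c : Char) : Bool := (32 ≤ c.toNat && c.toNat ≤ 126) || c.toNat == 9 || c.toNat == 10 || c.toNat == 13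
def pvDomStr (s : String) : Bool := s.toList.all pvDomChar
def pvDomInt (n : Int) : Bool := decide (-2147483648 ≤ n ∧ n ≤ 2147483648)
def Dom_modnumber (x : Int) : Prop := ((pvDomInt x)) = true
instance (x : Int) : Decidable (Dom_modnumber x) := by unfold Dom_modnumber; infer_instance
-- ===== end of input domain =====

-- B replaces A's mutating divide-by-ten accumulator loop with a positional-weight sum over the
-- decimal string of abs(x) (each digit weighted by ten to its index), then the same overflow clamp and sign (alternative, not faster).

-- ===== PORT A =====
-- the 'while x > 0' loop of A, carrying (x, out)
def modnumberLoop (x : Int) (out : Int) : Int :=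
  if h : x > 0 then
    modnumberLoop (PySem.Int.floordiv x 10) (out * 10 + PySem.Int.mod x 10)
  else out
termination_by x.toNat
decreasing_by
  have hx : x = (x.toNat : Int) := (Int.toNat_of_nonneg (by omega)).symm
  have h10 : PySem.Int.floordiv x 10 = ((x.toNat / 10 : Nat) : Int) := by
    rw [hx]; exact_mod_cast PySem.Int.floordiv_natCast x.toNat 10
  rw [h10, Int.toNat_natCast]
  exact Nat.div_lt_self (by omega) (by omega)

def modnumber (x : Int) : Int :=
  let flag : Int := if x < 0 then 1 else 0
  let x1 : Int := if x < 0 then -x else x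
  let _count : Int := 0
  let out : Int := modnumberLoop x1 0
  if |out| > 2 ^ 31 - 1 then 0
  else if flag = 0 then out
  else -out

-- ===== PORT B =====
-- sum((ord(c) - 48) * 10 ** i for i, c in enumerate(str(abs(x)))); enumerate indices are ≥ 0,
-- so '10 ** i' is ported exactly as '10 ^ p.1.toNat'
def modnumber_alt (x : Int) : Int :=
  let sign : Int := if x < 0 then -1 else 1
  let out : Int := (PySem.List.enumerate (PySem.Int.toStr |x|).toList 0).foldl
      (fun acc p => acc + ((p.2.toNat : Int) - 48) * 10 ^ p.1.toNat) 0
  if out > 2 ^ 31 - 1 then 0 else sign * out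

-- ===== PRECONDITION & SPEC =====
def Spec_modnumber (x : Int) (out : Int) : Prop := out = modnumber_alt x
instance (x : Int) (out : Int) : Decidable (Spec_modnumber x out) := by unfold Spec_modnumber; infer_instance

-- ===== CLAIM (what is proved, stated in full; the proofs are below) =====
def Claim_equal_modnumber : Prop := ∀ (x : Int), Dom_modnumber x → Spec_modnumber x (modnumber x)

-- ===== LEMMAS AND PROOFS =====

-- the value both programs compute before clamping: abs(x)'s decimal digits reversed, read as a number
def pvRevI (n : Nat) : Int := ((Nat.ofDigits 10 ((Nat.digits 10 n).reverse) : Nat) : Int)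

lemma pvRevI_nonneg (n : Nat) : 0 ≤ pvRevI n := by
  unfold pvRevI; exact Int.natCast_nonneg _

lemma pvLoop_eq (n : Nat) : ∀ acc : Int,
    modnumberLoop (n : Int) acc = acc * 10 ^ (Nat.digits 10 n).length + pvRevI n := by
  induction n using Nat.strong_induction_on with
  | _ n ih =>
    intro acc
    rw [modnumberLoop]
    by_cases hn : 0 < n
    · have hlt : (0 : Int) < (n : Int) := by exact_mod_cast hn
      have hfd : PySem.Int.floordiv (n : Int) 10 = ((n / 10 : Nat) : Int) := by
        exact_mod_cast PySem.Int.floordiv_natCast n 10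
      have hmd : PySem.Int.mod (n : Int) 10 = ((n % 10 : Nat) : Int) := by
        exact_mod_cast PySem.Int.mod_natCast n 10
      rw [dif_pos hlt, hfd, hmd, ih (n / 10) (Nat.div_lt_self hn (by omega))]
      have hd : Nat.digits 10 n = n % 10 :: Nat.digits 10 (n / 10) :=
        Nat.digits_def' (by omega) hn
      unfold pvRevI
      rw [hd]
      simp only [List.reverse_cons, List.length_cons, Nat.ofDigits_append,
        Nat.ofDigits_cons, Nat.ofDigits_nil, List.length_reverse]
      push_cast
      ring
    · have h0 : n = 0 := by omega
      subst h0
      rw [dif_neg (by omega)]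
      simp [pvRevI, Nat.ofDigits_nil]

lemma pvDigitCharVal (d : Nat) (h : d < 10) : (Nat.digitChar d).toNat - 48 = d := by
  interval_cases d <;> decide

lemma pvMap_val_toDigits (n : Nat) (hn : 0 < n) :
    (Nat.toDigits 10 n).map (fun c => c.toNat - 48) = (Nat.digits 10 n).reverse := by
  induction n using Nat.strong_induction_on with
  | _ n ih =>
    rw [Nat.toDigits_eq_if (by omega)]
    have hd : Nat.digits 10 n = n % 10 :: Nat.digits 10 (n / 10) := Nat.digits_def' (by omega) hn
    by_cases h : n < 10
    · rw [if_pos h, hd]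
      have hq0 : n / 10 = 0 := by omega
      rw [hq0]
      simp [pvDigitCharVal n h, Nat.mod_eq_of_lt h]
    · rw [if_neg h]
      have hq : 0 < n / 10 := by omega
      rw [List.map_append, ih (n / 10) (Nat.div_lt_self hn (by omega)) hq, hd]
      simp only [List.reverse_cons, List.map_cons, List.map_nil, List.append_cancel_left_eq]
      have h10 : n % 10 < 10 := Nat.mod_lt _ (by omega)
      simp [pvDigitCharVal _ h10]

lemma pvFoldl_enum (L : List Char) : ∀ (s : Nat) (acc : Int), (∀ c ∈ L, 48 ≤ c.toNat) →
    (PySem.List.enumerate L (s : Int)).foldl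
        (fun acc p => acc + ((p.2.toNat : Int) - 48) * 10 ^ p.1.toNat) acc
      = acc + 10 ^ s * ((Nat.ofDigits 10 (L.map (fun c => c.toNat - 48)) : Nat) : Int) := by
  induction L with
  | nil => intro s acc _; simp [PySem.List.enumerate_nil, Nat.ofDigits_nil]
  | cons c t ih =>
    intro s acc hL
    rw [PySem.List.enumerate_cons, List.foldl_cons]
    have hcast : ((s : Int) + 1) = ((s + 1 : Nat) : Int) := by push_cast; ring
    rw [hcast, ih (s + 1) _ (fun d hd => hL d (List.mem_cons_of_mem _ hd))]
    simp only [List.map_cons, Nat.ofDigits_cons, Int.toNat_natCast]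
    have h48 : ((c.toNat : Int) - 48) = ((c.toNat - 48 : Nat) : Int) := by
      have := hL c (List.mem_cons_self)
      omega
    rw [h48]
    push_cast
    ring

lemma pvAlt_out (n : Nat) :
    (PySem.List.enumerate (PySem.Int.toStr (n : Int)).toList 0).foldl
        (fun acc p => acc + ((p.2.toNat : Int) - 48) * 10 ^ p.1.toNat) 0 = pvRevI n := by
  have hts : (PySem.Int.toStr (n : Int)).toList = Nat.toDigits 10 n := by
    rw [PySem.Int.toList_toStr, PySem.Int.toChars]
    rw [if_neg (by omega)]
    simp
  have h48 : ∀ c ∈ Nat.toDigits 10 n, 48 ≤ c.toNat := by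
    intro c hc
    have := Nat.isDigit_of_mem_toDigits (by omega) (by omega) hc
    simp [Char.isDigit] at this
    exact this.1
  have hf := pvFoldl_enum (Nat.toDigits 10 n) 0 0 h48
  simp only [Nat.cast_zero] at hf
  rw [hts, hf]
  by_cases hn : 0 < n
  · rw [pvMap_val_toDigits n hn]; unfold pvRevI; ring
  · have : n = 0 := by omega
    subst this
    simp [Nat.toDigits_zero, pvRevI, Nat.ofDigits_cons, Nat.ofDigits_nil]

-- ===== VERDICT (by name: the statement is the Claim_ definition above) =====
set_option maxRecDepth 8192 in
theorem modnumber_spec : Claim_equal_modnumber := by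
  intro x _
  unfold Spec_modnumber modnumber modnumber_alt
  have habs : |x| = (x.natAbs : Int) := Int.abs_eq_natAbs x
  have hx1 : (if x < 0 then -x else x) = (x.natAbs : Int) := by split_ifs with h <;> omega
  have hnn := pvRevI_nonneg x.natAbs
  dsimp only
  rw [habs, hx1, pvLoop_eq x.natAbs 0, pvAlt_out x.natAbs, zero_mul, zero_add,
    abs_of_nonneg hnn]
  split_ifs <;> omega
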